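-- pv_equiv track=rewrite | github.com/Shiv2157k/leet_code | revisited_2021/arrays/analyze_user_website_visit_pattern.py | analyze_pattern
-- ===== SOURCE A (Python) =====
-- import heapq
-- from itertools import combinations
-- from typing import List
-- from collections import defaultdict
--
-- def analyze_pattern(username: List[str], timestamps: List[int], websites: List[str]):
--     """
--     Approach: Using heapq, combinations and defaultdict.
--     :param username:
--     :param timestamps:
--     :param websites:
--     :return:
--     """
--     # sort them based on time stamps
--     heap = []
--     for i in range(len(username)):
--         heapq.heappush(heap, (timestamps[i], username[i], websites[i]))
--
--     # store all the website visited by user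
--     users = defaultdict(list)
--     while heap:
--         _, user, web_site = heapq.heappop(heap)
--         users[user].append(web_site)
--
--     # get the combinations and gather the common count
--     count = defaultdict(int)
--     maximum, result = 0, tuple()
--
--     for user, web_sites in users.items():
--         combos = combinations(web_sites, 3)
--         for sequence in set(combos):
--             count[sequence] += 1
--             if maximum < count[sequence]:
--                 maximum = count[sequence]
--                 result = sequence
--             elif count[sequence] == maximum:
--                 if sequence < result:
--                     result = sequence
--     return result
-- ===== SOURCE B (Python) =====
-- from itertools import combinations
--
--
-- def _is_subseq(sub, seq):
--     """Is `sub` a (not necessarily contiguous) subsequence of `seq`?  Greedy scan."""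
--     it = iter(seq)
--     return all(x in it for x in sub)
--
--
-- def analyze_pattern(username, timestamps, websites):
--     """
--     No count table: gather the candidate 3-sequences, then scan them in sorted
--     order, computing each candidate's score directly as the number of users
--     whose visit list contains it as a subsequence; a strict '>' on the sorted
--     scan makes the first maximal candidate the lexicographically smallest one.
--     """
--     visits = {}
--     for _, user, site in sorted(zip(timestamps, username, websites)):
--         visits.setdefault(user, []).append(site)
--     seqs = list(visits.values())
--
--     cands = set()
--     for sites in seqs:
--         cands.update(combinations(sites, 3))
--
--     best_count, best = 0, tuple()
--     for cand in sorted(cands):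
--         score = sum(1 for sites in seqs if _is_subseq(cand, sites))
--         if best_count < score:
--             best_count, best = score, cand
--     return best
-- ===== Notes on version B (the rewrite author's own statement) =====
-- stated objective: alternative
-- what changed: B keeps no count table at all: it collects the candidate 3-sequences once, then scans them in sorted order and recomputes each candidate's score from scratch as the number of users whose visit list contains it as a subsequence (greedy subsequence test), a strict '>' on the sorted scan yielding the lexicographically smallest maximal candidate; A instead builds a triple->count dict incrementally per user with a fused running max/tie-break.
import Mathlib
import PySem

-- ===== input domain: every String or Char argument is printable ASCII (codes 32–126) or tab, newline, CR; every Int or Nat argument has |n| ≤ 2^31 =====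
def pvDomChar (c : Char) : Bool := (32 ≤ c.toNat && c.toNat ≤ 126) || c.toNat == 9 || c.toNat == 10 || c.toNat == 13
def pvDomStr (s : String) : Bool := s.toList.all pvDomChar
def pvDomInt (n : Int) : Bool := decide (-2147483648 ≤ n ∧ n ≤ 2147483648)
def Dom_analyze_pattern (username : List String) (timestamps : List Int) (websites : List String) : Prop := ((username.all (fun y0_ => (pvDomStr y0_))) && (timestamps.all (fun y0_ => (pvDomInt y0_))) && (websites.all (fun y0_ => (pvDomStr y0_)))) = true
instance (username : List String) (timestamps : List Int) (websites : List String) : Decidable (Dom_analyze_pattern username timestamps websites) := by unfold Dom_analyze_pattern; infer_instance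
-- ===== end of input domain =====

-- B keeps no count table: it collects the candidate 3-sequences once, then scans them in
-- sorted order, scoring each candidate directly as the number of users whose visit list
-- contains it as a subsequence (objective: alternative algorithm, similar cost).

-- ===== PORT A =====

-- Python tuple order on the (timestamp, username, website) triples: lexicographic.
def tripKey (x : Int × String × String) : Int ×ₗ (String ×ₗ String) := toLex (x.1, toLex x.2)

-- heapq.heappush ported as ordered insertion (pop = head): exact for A's push-all-then-pop-all
-- usage because the order on the triples is total, so the pop sequence of any min-heap is the
-- unique sorted sequence of the pushed elements.
def heappush (h : List (Int × String × String)) (x : Int × String × String) : List (Int × String × String) :=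
  PySem.List.insertBy (fun a b => decide (tripKey a < tripKey b)) x h

-- 'while heap: _, user, web_site = heappop(heap); users[user].append(web_site)'
def drainA (h : List (Int × String × String)) (d : PySem.Dict String (List String)) : PySem.Dict String (List String) :=
  match h with
  | [] => d
  | x :: rest => drainA rest (d.modify x.2.1 [] (· ++ [x.2.2]))

-- Python's 'sequence < result' on the tuples (lists here): lexicographic, elementwise.
def seqLt : List String → List String → Bool
  | _, [] => false
  | [], _ :: _ => true
  | a :: as, b :: bs => if a < b then true else if b < a then false else seqLt as bs

-- 'count[sequence] += 1' on the defaultdict(int)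
def cntStep (c : PySem.Dict (List String) Int) (s : List String) : PySem.Dict (List String) Int :=
  c.insert s (c.getD s 0 + 1)

-- A's fused loop body: increment, then update (maximum, result) in place.
def stepA (st : PySem.Dict (List String) Int × Int × List String) (seq : List String) :
    PySem.Dict (List String) Int × Int × List String :=
  let c := cntStep st.1 seq
  let v := c.getD seq 0
  if st.2.1 < v then (c, v, seq)
  else if v == st.2.1 then (if seqLt seq st.2.2 then (c, st.2.1, seq) else (c, st.2.1, st.2.2))
  else (c, st.2.1, st.2.2)

-- NOTE on 'for sequence in set(combos)': Python iterates the set in hash order; the port iterates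
-- it in first-insertion order.  This is exact because the loop's final (maximum, result) is proved
-- below to depend only on the final count table, not on the iteration order.
def analyze_pattern (username : List String) (timestamps : List Int) (websites : List String) : List String :=
  let heap := (PySem.List.pyRange 0 (PySem.List.len username) 1).foldl
    (fun h i => heappush h (PySem.List.pyGetD timestamps i 0, PySem.List.pyGetD username i "", PySem.List.pyGetD websites i "")) []
  let users := drainA heap PySem.Dict.empty
  let st := users.items.foldl
    (fun st p => (PySem.Set.ofList (PySem.List.combinations p.2 3)).foldl stepA st)
    (PySem.Dict.empty, 0, ([] : List String))
  st.2.2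

-- ===== PORT B =====

-- Source B's _is_subseq: 'all(x in it for x in sub)' consumes the iterator greedily — 'x in it'
-- scans forward, dropping elements, until it meets x; this recursion is exactly that scan.
def isSubseq : List String → List String → Bool
  | [], _ => true
  | _ :: _, [] => false
  | x :: s, y :: l => if x == y then isSubseq s l else isSubseq (x :: s) l

-- visits.setdefault(user, []).append(site)  =  visits[user] = visits.get(user, []) + [site]
def analyze_pattern_alt (username : List String) (timestamps : List Int) (websites : List String) : List String :=
  let visits := (PySem.List.sorted (timestamps.zip (username.zip websites)) tripKey false).foldl
    (fun d x => d.modify x.2.1 [] (· ++ [x.2.2])) PySem.Dict.empty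
  let seqs := visits.values
  let cands := seqs.foldl (fun s sites => PySem.Set.update s (PySem.List.combinations sites 3)) PySem.Set.empty
  -- 'sorted(cands)' is order-safe on the Set: sorting with the identity key
  let st := (PySem.List.sorted cands (fun c => c) false).foldl
    (fun st cand =>
      let score := (seqs.map (fun sites => if isSubseq cand sites then (1 : Int) else 0)).sum
      if st.1 < score then (score, cand) else st)
    ((0 : Int), ([] : List String))
  st.2

-- ===== PRECONDITION & SPEC =====
-- A indexes timestamps[i] and websites[i] for every i < len(username): it raises IndexError
-- when either list is shorter than username, so exactly those inputs are excluded.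
def Pre_analyze_pattern (username : List String) (timestamps : List Int) (websites : List String) : Prop :=
  username.length ≤ timestamps.length ∧ username.length ≤ websites.length
instance (username : List String) (timestamps : List Int) (websites : List String) : Decidable (Pre_analyze_pattern username timestamps websites) := by unfold Pre_analyze_pattern; infer_instance

def pvWitness_analyze_pattern : List String × List Int × List String :=
  (["u", "u", "u", "v"], [3, 1, 2, 4], ["a", "b", "c", "d"])

def Spec_analyze_pattern (username : List String) (timestamps : List Int) (websites : List String) (out : List String) : Prop := out = analyze_pattern_alt username timestamps websites
instance (username : List String) (timestamps : List Int) (websites : List String) (out : List String) : Decidable (Spec_analyze_pattern username timestamps websites out) := by unfold Spec_analyze_pattern; infer_instance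

-- ===== CLAIM (what is proved, stated in full; the proofs are below) =====
def Claim_equal_analyze_pattern : Prop := ∀ (username : List String) (timestamps : List Int) (websites : List String), Dom_analyze_pattern username timestamps websites → Pre_analyze_pattern username timestamps websites → Spec_analyze_pattern username timestamps websites (analyze_pattern username timestamps websites)


-- ===== LEMMAS AND PROOFS =====

-- seqLt is Python's tuple '<', i.e. the lexicographic order on List String
lemma seqLt_iff (a b : List String) : seqLt a b = true ↔ a < b := by
  induction a generalizing b with
  | nil =>
    cases b with
    | nil => simp [seqLt]
    | cons y ys => simp [seqLt, List.nil_lt_cons y ys]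
  | cons x xs ih =>
    cases b with
    | nil => simp [seqLt, List.not_lt_nil (x :: xs)]
    | cons y ys =>
      rw [List.cons_lt_cons_iff]
      simp only [seqLt]
      split_ifs with h1 h2
      · simp [h1]
      · constructor
        · intro h; cases h
        · rintro (h | ⟨rfl, h⟩)
          · exact absurd h (lt_asymm h2)
          · exact absurd h2 (lt_irrefl x)
      · have hxy : x = y := le_antisymm (not_lt.1 h2) (not_lt.1 h1)
        subst hxy
        rw [ih]
        simp

lemma seqLt_irrefl (a : List String) : seqLt a a = false := by
  cases h : seqLt a a
  · rfl
  · exact absurd ((seqLt_iff a a).1 h) (lt_irrefl a)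

lemma seqLt_false_iff (a b : List String) : seqLt a b = false ↔ ¬ a < b := by
  rw [← seqLt_iff]
  cases seqLt a b <;> simp

-- the loop invariant of A's fused counting loop
def InvA (c : PySem.Dict (List String) Int) (m : Int) (r : List String) : Prop :=
  c.keys.Nodup ∧
  (∀ p ∈ c.items, 1 ≤ p.2 ∧ p.2 ≤ m) ∧
  (c.items = [] → m = 0 ∧ r = []) ∧
  (c.items ≠ [] → (r, m) ∈ c.items ∧ ∀ p ∈ c.items, p.2 = m → seqLt p.1 r = false)

-- the default on the counter: getD s 0 is 0 for a fresh key, else the stored (positive) value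
lemma getD_cases (c : PySem.Dict (List String) Int) (s : List String) (hnd : c.keys.Nodup) :
    (c.getD s 0 = 0 ∧ ∀ v, (s, v) ∉ c.items) ∨ (s, c.getD s 0) ∈ c.items := by
  cases hg : c.get? s with
  | none =>
    left
    refine ⟨by rw [PySem.Dict.getD_eq_get?_getD, hg]; rfl, fun v hv => ?_⟩
    have := PySem.Dict.get?_of_mem_items c hv hnd
    rw [hg] at this; cases this
  | some v =>
    right
    have hm := PySem.Dict.mem_items_of_get?_eq_some c hg
    rw [PySem.Dict.getD_eq_get?_getD, hg]
    exact hm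

lemma invA_step (c : PySem.Dict (List String) Int) (m : Int) (r s : List String)
    (h : InvA c m r) : InvA (stepA (c, m, r) s).1 (stepA (c, m, r) s).2.1 (stepA (c, m, r) s).2.2 := by
  obtain ⟨hnd, hbnd, hemp, hne⟩ := h
  have hnd' : (cntStep c s).keys.Nodup := PySem.Dict.nodup_keys_insert _ _ _ hnd
  have hitems : ∀ p, p ∈ (cntStep c s).items ↔ p = (s, c.getD s 0 + 1) ∨ (p ∈ c.items ∧ p.1 ≠ s) :=
    fun p => PySem.Dict.mem_items_insert c s (c.getD s 0 + 1) p
  have hv : (cntStep c s).getD s 0 = c.getD s 0 + 1 := PySem.Dict.getD_insert_self c s _ 0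
  have hw : 0 ≤ c.getD s 0 ∧ c.getD s 0 ≤ m ∧ ((s, c.getD s 0) ∈ c.items ∨ c.getD s 0 = 0) := by
    rcases getD_cases c s hnd with ⟨hz, _⟩ | hmem
    · refine ⟨by omega, ?_, Or.inr hz⟩
      by_cases hcase : c.items = []
      · have := hemp hcase; omega
      · have hb := hbnd (r, m) (hne hcase).1
        dsimp only at hb; omega
    · have hb := hbnd _ hmem
      exact ⟨by omega, hb.2, Or.inl hmem⟩
  have hne' : (cntStep c s).items ≠ [] := by
    intro h0
    have := (hitems (s, c.getD s 0 + 1)).2 (Or.inl rfl)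
    rw [h0] at this; cases this
  unfold stepA
  dsimp only
  rw [hv]
  split_ifs with h1 h2 h3
  -- branch: the incremented count beats the running maximum
  · refine ⟨hnd', ?_, fun h0 => absurd h0 hne', fun _ => ⟨(hitems _).2 (Or.inl rfl), ?_⟩⟩
    · intro p hp
      rcases (hitems p).1 hp with rfl | ⟨hpold, _⟩
      · dsimp only; omega
      · have := hbnd p hpold; dsimp only; omega
    · intro p hp hpv
      dsimp only at hpv
      rcases (hitems p).1 hp with rfl | ⟨hpold, _⟩
      · exact seqLt_irrefl s
      · have := hbnd p hpold; omega
  -- branches with v == maximum: ties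
  all_goals try (
    have hveq : c.getD s 0 + 1 = m := by simpa using h2 )
  -- common facts for the non-increasing branches
  all_goals try (
    have hcne : c.items ≠ [] := by
      intro h0
      have := hemp h0
      omega )
  all_goals obtain ⟨hrm, hrb⟩ := hne hcne
  all_goals
    have hrs : r ≠ s := by
      intro hrseq
      subst hrseq
      have := PySem.Dict.getD_of_mem_items c hrm hnd 0
      omega
  -- tie and s < result: result becomes s
  · refine ⟨hnd', ?_, fun h0 => absurd h0 hne', fun _ => ⟨?_, ?_⟩⟩
    · intro p hp
      rcases (hitems p).1 hp with rfl | ⟨hpold, _⟩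
      · dsimp only; omega
      · have := hbnd p hpold; dsimp only; omega
    · have : ((s, c.getD s 0 + 1) : List String × Int) = (s, m) := by rw [hveq]
      exact this ▸ (hitems _).2 (Or.inl rfl)
    · intro p hp hpv
      dsimp only at hpv
      rcases (hitems p).1 hp with rfl | ⟨hpold, hps⟩
      · exact seqLt_irrefl s
      · have hold := hrb p hpold hpv
        rw [seqLt_false_iff] at hold ⊢
        intro hlt
        exact hold (lt_trans hlt ((seqLt_iff s r).1 h3))
  -- tie and ¬ s < result: result kept
  · refine ⟨hnd', ?_, fun h0 => absurd h0 hne', fun _ => ⟨?_, ?_⟩⟩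
    · intro p hp
      rcases (hitems p).1 hp with rfl | ⟨hpold, _⟩
      · dsimp only; omega
      · have := hbnd p hpold; dsimp only; omega
    · exact (hitems _).2 (Or.inr ⟨hrm, hrs⟩)
    · intro p hp hpv
      dsimp only at hpv
      rcases (hitems p).1 hp with rfl | ⟨hpold, _⟩
      · dsimp only
        simpa using h3
      · exact hrb p hpold hpv
  -- strictly below the maximum: nothing changes
  · have hvlt : c.getD s 0 + 1 < m := by
      have : ¬ ((c.getD s 0 + 1 : Int) == m) = true := h2
      simp at this; omega
    refine ⟨hnd', ?_, fun h0 => absurd h0 hne', fun _ => ⟨?_, ?_⟩⟩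
    · intro p hp
      rcases (hitems p).1 hp with rfl | ⟨hpold, _⟩
      · dsimp only; omega
      · have := hbnd p hpold; dsimp only; omega
    · exact (hitems _).2 (Or.inr ⟨hrm, hrs⟩)
    · intro p hp hpv
      dsimp only at hpv
      rcases (hitems p).1 hp with rfl | ⟨hpold, _⟩
      · dsimp only at hpv; omega
      · exact hrb p hpold hpv

lemma invA_foldl (L : List (List String)) (st : PySem.Dict (List String) Int × Int × List String)
    (h : InvA st.1 st.2.1 st.2.2) :
    InvA (L.foldl stepA st).1 (L.foldl stepA st).2.1 (L.foldl stepA st).2.2 := by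
  induction L generalizing st with
  | nil => exact h
  | cons x xs ih => exact ih _ (invA_step _ _ _ _ h)

lemma invA_outer (items : List (String × List String))
    (st : PySem.Dict (List String) Int × Int × List String)
    (h : InvA st.1 st.2.1 st.2.2) :
    InvA ((items.foldl (fun st p => (PySem.Set.ofList (PySem.List.combinations p.2 3)).foldl stepA st) st).1)
      ((items.foldl (fun st p => (PySem.Set.ofList (PySem.List.combinations p.2 3)).foldl stepA st) st).2.1)
      ((items.foldl (fun st p => (PySem.Set.ofList (PySem.List.combinations p.2 3)).foldl stepA st) st).2.2) := by
  induction items generalizing st with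
  | nil => exact h
  | cons x xs ih => exact ih _ (invA_foldl _ _ h)

lemma invA_init : InvA PySem.Dict.empty 0 [] := by
  refine ⟨List.nodup_nil, ?_, fun _ => ⟨rfl, rfl⟩, fun h0 => absurd rfl h0⟩
  intro p hp
  exact absurd hp (List.not_mem_nil)

-- first component of A's fused loop is the plain counting loop
lemma stepA_fst (st : PySem.Dict (List String) Int × Int × List String) (s : List String) :
    (stepA st s).1 = cntStep st.1 s := by
  unfold stepA; dsimp only; split_ifs <;> rfl

lemma foldl_stepA_fst (L : List (List String)) (st : PySem.Dict (List String) Int × Int × List String) :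
    (L.foldl stepA st).1 = L.foldl cntStep st.1 := by
  induction L generalizing st with
  | nil => rfl
  | cons x xs ih => rw [List.foldl_cons, List.foldl_cons, ih, stepA_fst]

lemma outer_fst (items : List (String × List String))
    (st : PySem.Dict (List String) Int × Int × List String) :
    (items.foldl (fun st p => (PySem.Set.ofList (PySem.List.combinations p.2 3)).foldl stepA st) st).1
      = items.foldl (fun c p => (PySem.Set.ofList (PySem.List.combinations p.2 3)).foldl cntStep c) st.1 := by
  induction items generalizing st with
  | nil => rfl
  | cons x xs ih => rw [List.foldl_cons, List.foldl_cons, ih, foldl_stepA_fst]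

-- ===== the final count table, characterised =====

-- per-user contribution to a sequence's count (0/1 per user, as an Int sum)
def cnt (items : List (String × List String)) (s : List String) : Int :=
  (items.map (fun p => if s ∈ PySem.Set.ofList (PySem.List.combinations p.2 3) then (1 : Int) else 0)).sum

lemma inner_getD (S : List (List String)) (c : PySem.Dict (List String) Int) (s : List String)
    (hnd : S.Nodup) :
    (S.foldl cntStep c).getD s 0 = c.getD s 0 + (if s ∈ S then 1 else 0) := by
  induction S generalizing c with
  | nil => simp
  | cons x S' ih =>
    rw [List.foldl_cons, ih (cntStep c x) (List.Nodup.of_cons hnd)]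
    by_cases hx : s = x
    · subst hx
      have hsnot : s ∉ S' := (List.nodup_cons.1 hnd).1
      simp [cntStep, hsnot]
    · simp [cntStep, PySem.Dict.getD_insert, hx]

lemma inner_keys (S : List (List String)) (c : PySem.Dict (List String) Int) (s : List String) :
    s ∈ (S.foldl cntStep c).keys ↔ s ∈ c.keys ∨ s ∈ S := by
  have : (S.foldl cntStep c).keys = PySem.Set.update c.keys S :=
    PySem.Dict.keys_foldl_insert S (fun d x => d.getD x 0 + 1) c
  rw [this, PySem.Set.mem_update]

lemma inner_nodup_keys (S : List (List String)) (c : PySem.Dict (List String) Int)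
    (h : c.keys.Nodup) : (S.foldl cntStep c).keys.Nodup :=
  PySem.Dict.nodup_keys_foldl_insert S (fun d x => d.getD x 0 + 1) c h

lemma outer_getD (items : List (String × List String)) (c : PySem.Dict (List String) Int)
    (s : List String) :
    (items.foldl (fun c p => (PySem.Set.ofList (PySem.List.combinations p.2 3)).foldl cntStep c) c).getD s 0
      = c.getD s 0 + cnt items s := by
  induction items generalizing c with
  | nil => simp [cnt]
  | cons q rest ih =>
    rw [List.foldl_cons, ih, inner_getD _ _ _ (PySem.Set.nodup_ofList _)]
    simp only [cnt, List.map_cons, List.sum_cons]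
    ring

lemma outer_keys (items : List (String × List String)) (c : PySem.Dict (List String) Int)
    (s : List String) :
    s ∈ (items.foldl (fun c p => (PySem.Set.ofList (PySem.List.combinations p.2 3)).foldl cntStep c) c).keys
      ↔ s ∈ c.keys ∨ ∃ p ∈ items, s ∈ PySem.List.combinations p.2 3 := by
  induction items generalizing c with
  | nil => simp
  | cons q rest ih =>
    rw [List.foldl_cons, ih, inner_keys]
    simp [PySem.Set.mem_ofList, or_assoc]

lemma outer_nodup_keys (items : List (String × List String)) (c : PySem.Dict (List String) Int)
    (h : c.keys.Nodup) :
    (items.foldl (fun c p => (PySem.Set.ofList (PySem.List.combinations p.2 3)).foldl cntStep c) c).keys.Nodup := by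
  induction items generalizing c with
  | nil => exact h
  | cons q rest ih => exact ih _ (inner_nodup_keys _ _ h)

-- ===== B's candidate set =====

lemma mem_cands (seqs : List (List String)) (s0 : PySem.Set (List String)) (y : List String) :
    y ∈ seqs.foldl (fun s sites => PySem.Set.update s (PySem.List.combinations sites 3)) s0
      ↔ y ∈ s0 ∨ ∃ sites ∈ seqs, y ∈ PySem.List.combinations sites 3 := by
  induction seqs generalizing s0 with
  | nil => simp
  | cons q rest ih =>
    rw [List.foldl_cons, ih, PySem.Set.mem_update]
    simp [or_assoc]

lemma nodup_cands (seqs : List (List String)) (s0 : PySem.Set (List String)) (h : s0.Nodup) :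
    (seqs.foldl (fun s sites => PySem.Set.update s (PySem.List.combinations sites 3)) s0).Nodup := by
  induction seqs generalizing s0 with
  | nil => exact h
  | cons q rest ih => exact ih _ (PySem.Set.nodup_update _ _ h)

-- ===== B's subsequence test =====

lemma isSubseq_eq_isSublist (a b : List String) : isSubseq a b = a.isSublist b := by
  induction b generalizing a with
  | nil => cases a <;> simp [isSubseq, List.isSublist]
  | cons y l ih =>
    cases a with
    | nil => simp [isSubseq, List.isSublist]
    | cons x s =>
      simp only [isSubseq, List.isSublist]
      split <;> simp [ih]

lemma isSubseq_iff (a b : List String) : isSubseq a b = true ↔ a.Sublist b := by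
  rw [isSubseq_eq_isSublist, List.isSublist_iff_sublist]

-- B's score of a length-3 candidate is exactly the count-table value
lemma score_eq_cnt (items : List (String × List String)) (cand : List String)
    (hlen : cand.length = 3) :
    ((items.map (·.2)).map (fun sites => if isSubseq cand sites then (1 : Int) else 0)).sum
      = cnt items cand := by
  unfold cnt
  rw [List.map_map]
  congr 1
  apply List.map_congr_left
  intro p _
  simp only [Function.comp]
  congr 1
  simp only [PySem.Set.mem_ofList, PySem.List.mem_combinations_iff, eq_iff_iff]
  rw [← isSubseq_iff]
  constructor
  · intro h; exact ⟨h, hlen⟩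
  · exact fun h => h.1

-- the count of a candidate some user produced is at least 1, and every count is nonnegative
lemma cnt_nonneg (items : List (String × List String)) (s : List String) : 0 ≤ cnt items s := by
  induction items with
  | nil => simp [cnt]
  | cons q rest ih =>
    simp only [cnt, List.map_cons, List.sum_cons] at *
    split_ifs <;> omega

lemma cnt_pos (items : List (String × List String)) (s : List String)
    (h : ∃ p ∈ items, s ∈ PySem.List.combinations p.2 3) : 1 ≤ cnt items s := by
  induction items with
  | nil => simp at h
  | cons q rest ih =>
    obtain ⟨p, hp, hps⟩ := h
    simp only [cnt, List.map_cons, List.sum_cons]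
    rcases List.mem_cons.1 hp with rfl | hp'
    · have := cnt_nonneg rest s
      rw [if_pos (by simpa [PySem.Set.mem_ofList] using hps)]
      simpa [cnt] using this
    · have := ih ⟨p, hp', hps⟩
      simp only [cnt] at this
      split_ifs <;> omega

-- ===== B's sorted scan =====

-- the two computable sorted-instances on List String agree with the LinearOrder-derived ones
lemma sorted_dec_irrel (xs : List (List String)) :
    PySem.List.sorted xs (fun c => c) false
      = @PySem.List.sorted (List String) (List String) List.instLinearOrder.toLT LinearOrder.toDecidableLT xs (fun c => c) false := by
  have h : (fun (a b : List String) => a.decidableLT b) = (@LinearOrder.toDecidableLT (List String) List.instLinearOrder) := by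
    funext a b
    exact Subsingleton.elim _ _
  rw [show (PySem.List.sorted xs (fun c => c) false)
      = @PySem.List.sorted (List String) (List String) List.instLT (fun a b => a.decidableLT b) xs (fun c => c) false from rfl, h]

lemma sorted_cands_pairwise_lt (xs : List (List String)) (hnd : xs.Nodup) :
    (PySem.List.sorted xs (fun c => c) false).Pairwise (· < ·) := by
  have hle : (PySem.List.sorted xs (fun c => c) false).Pairwise (· ≤ ·) := by
    rw [sorted_dec_irrel]
    exact PySem.List.sorted_pairwise xs (fun c => c)
  have hnd' : (PySem.List.sorted xs (fun c => c) false).Nodup :=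
    (PySem.List.sorted_perm xs (fun c => c) false).nodup_iff.2 hnd
  refine (hle.and hnd').imp ?_
  rintro a b ⟨h1, h2⟩
  exact lt_of_le_of_ne h1 h2

-- invariant of the strict-improvement scan over a strictly increasing candidate list
lemma scan_aux (g : List String → Int) (L : List (List String)) (M : Int) (R : List String)
    (hpw : L.Pairwise (· < ·)) :
    M ≤ (L.foldl (fun st c => if st.1 < g c then (g c, c) else st) (M, R)).1 ∧
    (∀ c ∈ L, g c ≤ (L.foldl (fun st c => if st.1 < g c then (g c, c) else st) (M, R)).1) ∧
    ((L.foldl (fun st c => if st.1 < g c then (g c, c) else st) (M, R)) = (M, R) ∨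
      ((L.foldl (fun st c => if st.1 < g c then (g c, c) else st) (M, R)).2 ∈ L ∧
       g (L.foldl (fun st c => if st.1 < g c then (g c, c) else st) (M, R)).2
         = (L.foldl (fun st c => if st.1 < g c then (g c, c) else st) (M, R)).1 ∧
       M < (L.foldl (fun st c => if st.1 < g c then (g c, c) else st) (M, R)).1)) ∧
    (∀ c ∈ L, g c = (L.foldl (fun st c => if st.1 < g c then (g c, c) else st) (M, R)).1 →
      M < (L.foldl (fun st c => if st.1 < g c then (g c, c) else st) (M, R)).1 →
      (L.foldl (fun st c => if st.1 < g c then (g c, c) else st) (M, R)).2 ≤ c) := by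
  induction L generalizing M R with
  | nil => exact ⟨le_refl M, by simp, Or.inl rfl, by simp⟩
  | cons c L' ih =>
    have hlt : ∀ c' ∈ L', c < c' := fun c' hc' => List.rel_of_pairwise_cons hpw hc'
    have hpw' : L'.Pairwise (· < ·) := hpw.of_cons
    rw [List.foldl_cons]
    by_cases h : M < g c
    · rw [if_pos h]
      obtain ⟨ia, ib, ic, id⟩ := ih (g c) c hpw'
      set res := L'.foldl (fun st c => if st.1 < g c then (g c, c) else st) (g c, c) with hres
      refine ⟨by omega, ?_, ?_, ?_⟩
      · intro c' hc'
        rcases List.mem_cons.1 hc' with rfl | hc''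
        · exact ia
        · exact ib c' hc''
      · rcases ic with heq | ⟨hm, hg, hlt'⟩
        · exact Or.inr ⟨by rw [heq]; exact List.mem_cons_self, by rw [heq], by rw [heq]; exact h⟩
        · exact Or.inr ⟨List.mem_cons_of_mem _ hm, hg, by omega⟩
      · intro c' hc' hgc' _
        rcases List.mem_cons.1 hc' with rfl | hc''
        · -- c' = c: if the max stayed g c the result is c itself
          rcases ic with heq | ⟨_, _, hlt'⟩
          · rw [heq]
          · omega
        · by_cases hgc : g c = res.1
          · rcases ic with heq | ⟨_, _, hlt'⟩
            · rw [heq]; exact le_of_lt (hlt c' hc'')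
            · omega
          · have : g c < res.1 := lt_of_le_of_ne ia hgc
            exact id c' hc'' hgc' this
    · rw [if_neg h]
      obtain ⟨ia, ib, ic, id⟩ := ih M R hpw'
      set res := L'.foldl (fun st c => if st.1 < g c then (g c, c) else st) (M, R) with hres
      refine ⟨ia, ?_, ?_, ?_⟩
      · intro c' hc'
        rcases List.mem_cons.1 hc' with rfl | hc''
        · omega
        · exact ib c' hc''
      · rcases ic with heq | ⟨hm, hg, hlt'⟩
        · exact Or.inl heq
        · exact Or.inr ⟨List.mem_cons_of_mem _ hm, hg, hlt'⟩
      · intro c' hc' hgc' hM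
        rcases List.mem_cons.1 hc' with rfl | hc''
        · omega
        · exact id c' hc'' hgc' hM

-- ===== gluing: under Pre_, A's heap build is the sorted zip =====

lemma map_idx_eq_zip (username : List String) (timestamps : List Int) (websites : List String)
    (h1 : username.length ≤ timestamps.length) (h2 : username.length ≤ websites.length) :
    (PySem.List.pyRange 0 (PySem.List.len username) 1).map
      (fun i => (PySem.List.pyGetD timestamps i 0, PySem.List.pyGetD username i "", PySem.List.pyGetD websites i ""))
    = timestamps.zip (username.zip websites) := by
  apply List.ext_getElem
  · simp [PySem.List.length_pyRange_one, PySem.List.len]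
    omega
  · intro i h1' h2'
    have hiun : i < username.length := by
      simpa [PySem.List.length_pyRange_one, PySem.List.len] using h1'
    have hits : i < timestamps.length := lt_of_lt_of_le hiun h1
    have hiws : i < websites.length := lt_of_lt_of_le hiun h2
    simp only [List.getElem_map, List.getElem_zip]
    rw [PySem.List.getElem_pyRange_one]
    simp only [zero_add, PySem.List.pyGetD_natCast]
    rw [List.getD_eq_getElem timestamps 0 hits, List.getD_eq_getElem username "" hiun,
      List.getD_eq_getElem websites "" hiws]

lemma heap_eq_sorted (username : List String) (timestamps : List Int) (websites : List String)
    (h1 : username.length ≤ timestamps.length) (h2 : username.length ≤ websites.length) :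
    (PySem.List.pyRange 0 (PySem.List.len username) 1).foldl
      (fun h i => heappush h (PySem.List.pyGetD timestamps i 0, PySem.List.pyGetD username i "", PySem.List.pyGetD websites i "")) []
    = PySem.List.sorted (timestamps.zip (username.zip websites)) tripKey false := by
  rw [PySem.List.sorted_eq_foldl_insertBy, ← map_idx_eq_zip username timestamps websites h1 h2,
    List.foldl_map]
  rfl

lemma drainA_eq_foldl (l : List (Int × String × String)) (d : PySem.Dict String (List String)) :
    drainA l d = l.foldl (fun d x => d.modify x.2.1 [] (· ++ [x.2.2])) d := by
  induction l generalizing d with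
  | nil => rfl
  | cons x xs ih => simp [drainA, ih]

-- ===== the main equality, over an arbitrary grouped dict =====

lemma main_eq (U : PySem.Dict String (List String)) :
    (U.items.foldl (fun st p => (PySem.Set.ofList (PySem.List.combinations p.2 3)).foldl stepA st)
      (PySem.Dict.empty, 0, ([] : List String))).2.2
    = (let seqs := U.values
       let cands := seqs.foldl (fun s sites => PySem.Set.update s (PySem.List.combinations sites 3)) PySem.Set.empty
       let st := (PySem.List.sorted cands (fun c => c) false).foldl
         (fun st cand =>
           let score := (seqs.map (fun sites => if isSubseq cand sites then (1 : Int) else 0)).sum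
           if st.1 < score then (score, cand) else st)
         ((0 : Int), ([] : List String))
       st.2) := by
  -- names
  set items := U.items with hitems
  have hseqs : U.values = items.map (·.2) := rfl
  set c0 := items.foldl (fun c p => (PySem.Set.ofList (PySem.List.combinations p.2 3)).foldl cntStep c) PySem.Dict.empty with hc0
  -- A's final state satisfies the invariant, and its table is c0
  have hInv := invA_outer items (PySem.Dict.empty, 0, ([] : List String)) invA_init
  have hfst := outer_fst items (PySem.Dict.empty, 0, ([] : List String))
  set stA := items.foldl (fun st p => (PySem.Set.ofList (PySem.List.combinations p.2 3)).foldl stepA st)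
    (PySem.Dict.empty, 0, ([] : List String)) with hstA
  rw [hfst] at hInv
  obtain ⟨hnd, hbnd, hemp, hne⟩ := hInv
  -- facts about c0
  have hgetD : ∀ s, c0.getD s 0 = cnt items s := by
    intro s
    rw [hc0, outer_getD]
    simp
  have hkeys : ∀ s, s ∈ c0.keys ↔ ∃ p ∈ items, s ∈ PySem.List.combinations p.2 3 := by
    intro s
    rw [hc0, outer_keys]
    simp
  have hndk : c0.keys.Nodup := by
    rw [hc0]; exact outer_nodup_keys _ _ (by simp [PySem.Dict.keys_empty])
  -- B's candidate set
  set cands := (items.map (·.2)).foldl (fun s sites => PySem.Set.update s (PySem.List.combinations sites 3)) PySem.Set.empty with hcands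
  have hmemc : ∀ y, y ∈ cands ↔ ∃ p ∈ items, y ∈ PySem.List.combinations p.2 3 := by
    intro y
    rw [hcands, mem_cands]
    constructor
    · rintro (h | ⟨sites, hs, hy⟩)
      · simp [PySem.Set.empty] at h
      · obtain ⟨p, hp, hps⟩ := List.mem_map.1 hs
        exact ⟨p, hp, hps ▸ hy⟩
    · rintro ⟨p, hp, hy⟩
      exact Or.inr ⟨p.2, List.mem_map.2 ⟨p, hp, rfl⟩, hy⟩
  have hndc : cands.Nodup := nodup_cands _ _ List.nodup_nil
  -- keys of c0 and cands have the same members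
  have hkc : ∀ s, s ∈ c0.keys ↔ s ∈ cands := fun s => by rw [hkeys, hmemc]
  -- candidates have length 3
  have hlen3 : ∀ y ∈ cands, y.length = 3 := by
    intro y hy
    obtain ⟨p, _, hyc⟩ := (hmemc y).1 hy
    exact PySem.List.length_of_mem_combinations hyc
  -- B's scoring function equals cnt on candidates
  set g : List String → Int := fun cand => ((items.map (·.2)).map (fun sites => if isSubseq cand sites then (1 : Int) else 0)).sum with hg
  have hgcnt : ∀ y ∈ cands, g y = cnt items y := fun y hy => score_eq_cnt items y (hlen3 y hy)
  -- the sorted candidate list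
  set L := PySem.List.sorted cands (fun c => c) false with hL
  have hmemL : ∀ y, y ∈ L ↔ y ∈ cands := fun y => PySem.List.mem_sorted cands (fun c => c) false y
  have hpwL : L.Pairwise (· < ·) := sorted_cands_pairwise_lt cands hndc
  obtain ⟨sa, sb, sc, sd⟩ := scan_aux g L 0 [] hpwL
  set res := L.foldl (fun st c => if st.1 < g c then (g c, c) else st) ((0 : Int), ([] : List String)) with hres
  -- goal reduces to str.2.2 = res.2
  show stA.2.2 = res.2
  by_cases hcnil : cands = []
  · -- no candidate: the count table is empty in A, the scan never fires in B
    have hLnil : L = [] := by rw [hL, PySem.List.sorted_eq_nil_iff, hcnil]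
    have hitnil : c0.items = [] := by
      by_contra hnn
      obtain ⟨p, hp⟩ := List.exists_mem_of_ne_nil _ hnn
      have : p.1 ∈ c0.keys := PySem.Dict.mem_keys_of_mem_items c0 hp
      rw [hkc, hcnil] at this
      exact absurd this (List.not_mem_nil)
    have hrnil := (hemp hitnil).2
    have : res = (0, []) := by rw [hres, hLnil]; rfl
    rw [this, hrnil]
  · -- some candidate exists: both sides name the lex-least sequence of maximal count
    have hitem_ne : c0.items ≠ [] := by
      obtain ⟨y, hy⟩ := List.exists_mem_of_ne_nil _ hcnil
      intro h0
      have : y ∈ c0.keys := (hkc y).2 hy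
      simp only [PySem.Dict.keys, h0, List.map_nil] at this
      exact absurd this (List.not_mem_nil)
    obtain ⟨hrm, hrmin⟩ := hne hitem_ne
    set m := stA.2.1 with hm
    set r := stA.2.2 with hr
    -- the scan fired: res.2 is a candidate with maximal score
    have hLne : L ≠ [] := by
      intro h0
      obtain ⟨y, hy⟩ := List.exists_mem_of_ne_nil _ hcnil
      have := (hmemL y).2 hy
      rw [h0] at this
      exact absurd this (List.not_mem_nil)
    have hfired : res.2 ∈ L ∧ g res.2 = res.1 ∧ 0 < res.1 := by
      rcases sc with heq | h
      · exfalso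
        obtain ⟨y, hyL⟩ := List.exists_mem_of_ne_nil _ hLne
        have hy1 : g y ≤ res.1 := sb y hyL
        have : 1 ≤ g y := by
          rw [hgcnt y ((hmemL y).1 hyL)]
          exact cnt_pos items y ((hmemc y).1 ((hmemL y).1 hyL))
        rw [heq] at hy1
        dsimp at hy1
        omega
      · exact h
    obtain ⟨hRL, hgR, hRpos⟩ := hfired
    have hRc : res.2 ∈ cands := (hmemL res.2).1 hRL
    -- item facts: r is a key with value m; res.2 is a key with value cnt items res.2 = res.1
    have hrval : m = cnt items r := by
      have := PySem.Dict.getD_of_mem_items c0 hrm hndk 0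
      rw [hgetD] at this
      omega
    have hrc : r ∈ cands := by
      rw [← hkc]
      exact PySem.Dict.mem_keys_of_mem_items c0 hrm
    have hRitem : (res.2, cnt items res.2) ∈ c0.items := by
      have hk : res.2 ∈ c0.keys := (hkc res.2).2 hRc
      have hcont : c0.contains res.2 = true := (PySem.Dict.contains_iff_mem_keys c0 res.2).2 hk
      cases hgq : c0.get? res.2 with
      | none =>
        exfalso
        rw [PySem.Dict.contains_eq_isSome_get?, hgq] at hcont
        simp at hcont
      | some v =>
        have hmemi := PySem.Dict.mem_items_of_get?_eq_some c0 hgq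
        have : c0.getD res.2 0 = v := PySem.Dict.getD_of_get?_eq_some c0 0 hgq
        rw [hgetD] at this
        rw [this]
        exact hmemi
    -- the two maxima agree
    have hRval : g res.2 = cnt items res.2 := hgcnt res.2 hRc
    have h1 : cnt items res.2 ≤ m := (hbnd _ hRitem).2
    have h2 : m ≤ res.1 := by
      have hrL : r ∈ L := (hmemL r).2 hrc
      have := sb r hrL
      rw [hgcnt r hrc, ← hrval] at this
      exact this
    have hmeq : m = res.1 := by
      rw [← hgR, hRval] at *
      omega
    -- minimality, both ways
    have hle1 : r ≤ res.2 := by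
      have := hrmin (res.2, cnt items res.2) hRitem (by dsimp; omega)
      dsimp at this
      rw [seqLt_false_iff] at this
      exact not_lt.1 this
    have hle2 : res.2 ≤ r := by
      have hrL : r ∈ L := (hmemL r).2 hrc
      exact sd r hrL (by rw [hgcnt r hrc, ← hrval, hmeq]) (by omega)
    exact le_antisymm hle1 hle2

-- ===== VERDICT (by name: the statement is the Claim_ definition above) =====
theorem analyze_pattern_spec : Claim_equal_analyze_pattern := by
  intro username timestamps websites _ hpre
  unfold Spec_analyze_pattern analyze_pattern analyze_pattern_alt
  simp only [heap_eq_sorted username timestamps websites hpre.1 hpre.2, drainA_eq_foldl]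
  exact main_eq _
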